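-- pv_equiv track=rewrite | github.com/MutenAI/text-Generator-V4 | content-generation-system/src/workflow_optimizer.py | _determine_task_complexity
-- ===== SOURCE A (Python) =====
-- def _determine_task_complexity(task_name: str) -> str:
--     """Determina la complessità di un task.
--
--     Args:
--         task_name: Nome del task
--
--     Returns:
--         Livello di complessità ('high', 'medium', 'low')
--     """
--     # Task che richiedono modelli potenti
--     high_complexity_tasks = ["expert_review", "technical_draft", "research"]
--
--     # Task di media complessità
--     medium_complexity_tasks = ["outline", "draft", "edit", "review"]
--
--     # Task semplici
--     low_complexity_tasks = ["finalize", "optimize", "brainstorm"]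
--
--     # Gestisci i task uniti
--     if "_and_" in task_name:
--         subtasks = task_name.split("_and_")
--         # Usa la complessità più alta tra i subtask
--         for subtask in subtasks:
--             if subtask in high_complexity_tasks:
--                 return "high"
--         for subtask in subtasks:
--             if subtask in medium_complexity_tasks:
--                 return "medium"
--         return "low"
--
--     # Task singoli
--     if task_name in high_complexity_tasks:
--         return "high"
--     elif task_name in medium_complexity_tasks:
--         return "medium"
--     else:
--         return "low"
-- ===== SOURCE B (Python) =====
-- def _determine_task_complexity(task_name: str) -> str:
--     """Determina la complessita di un task (single pass: max priority over subtasks)."""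
--     rank = {
--         "expert_review": 2, "technical_draft": 2, "research": 2,
--         "outline": 1, "draft": 1, "edit": 1, "review": 1,
--     }
--     level = 0
--     for part in task_name.split("_and_"):
--         level = max(level, rank.get(part, 0))
--     return ("low", "medium", "high")[level]
-- ===== Notes on version B (the rewrite author's own statement) =====
-- stated objective: simpler
-- what changed: Replaces the joined/single branch split and the two sequential scan loops by a single unconditional split and one max-over-priority-rank pass, indexing the result into a level table.
import Mathlib
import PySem

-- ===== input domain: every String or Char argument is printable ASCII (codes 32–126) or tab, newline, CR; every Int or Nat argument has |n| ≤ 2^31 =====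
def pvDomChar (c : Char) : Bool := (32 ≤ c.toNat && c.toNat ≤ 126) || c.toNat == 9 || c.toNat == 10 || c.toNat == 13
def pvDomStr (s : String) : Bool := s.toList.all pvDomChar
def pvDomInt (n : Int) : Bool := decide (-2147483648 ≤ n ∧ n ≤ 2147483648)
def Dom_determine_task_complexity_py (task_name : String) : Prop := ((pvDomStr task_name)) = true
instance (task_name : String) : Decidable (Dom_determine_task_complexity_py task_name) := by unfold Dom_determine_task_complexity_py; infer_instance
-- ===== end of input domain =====

-- B is a simpler decomposition of A: one unconditional split and a single max-over-rank pass
-- instead of A's joined/single branching with two sequential scan loops. Return values agree on all inputs.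

-- ===== PORT A =====
def pvHighTasks : List (List Char) :=
  ["expert_review".toList, "technical_draft".toList, "research".toList]
def pvMediumTasks : List (List Char) :=
  ["outline".toList, "draft".toList, "edit".toList, "review".toList]

-- 'for subtask in subtasks: if subtask in high_complexity_tasks: return "high"'
def pvLoopHigh : List (List Char) → Option String
  | [] => none
  | s :: rest => if s ∈ pvHighTasks then some "high" else pvLoopHigh rest

-- 'for subtask in subtasks: if subtask in medium_complexity_tasks: return "medium"'
def pvLoopMedium : List (List Char) → Option String
  | [] => none
  | s :: rest => if s ∈ pvMediumTasks then some "medium" else pvLoopMedium rest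

def determine_task_complexity_py (task_name : String) : String :=
  if PySem.Chars.isIn "_and_".toList task_name.toList then
    match pvLoopHigh (PySem.Chars.splitOn task_name.toList "_and_".toList) with
    | some r => r
    | none =>
      match pvLoopMedium (PySem.Chars.splitOn task_name.toList "_and_".toList) with
      | some r => r
      | none => "low"
  else
    if task_name.toList ∈ pvHighTasks then "high"
    else if task_name.toList ∈ pvMediumTasks then "medium"
    else "low"

-- ===== PORT B =====
def pvRank : PySem.Dict (List Char) Int :=
  PySem.Dict.ofList
    [("expert_review".toList, 2), ("technical_draft".toList, 2), ("research".toList, 2),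
     ("outline".toList, 1), ("draft".toList, 1), ("edit".toList, 1), ("review".toList, 1)]

def determine_task_complexity_py_alt (task_name : String) : String :=
  PySem.List.pyGetD ["low", "medium", "high"]
    ((PySem.Chars.splitOn task_name.toList "_and_".toList).foldl
      (fun acc part => max acc (pvRank.getD part 0)) 0) ""

-- ===== PRECONDITION & SPEC =====
def Spec_determine_task_complexity_py (task_name : String) (out : String) : Prop := out = determine_task_complexity_py_alt task_name
instance (task_name : String) (out : String) : Decidable (Spec_determine_task_complexity_py task_name out) := by unfold Spec_determine_task_complexity_py; infer_instance

-- ===== CLAIM (what is proved, stated in full; the proofs are below) =====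
def Claim_equal_determine_task_complexity_py : Prop := ∀ (task_name : String), Dom_determine_task_complexity_py task_name → Spec_determine_task_complexity_py task_name (determine_task_complexity_py task_name)

-- ===== LEMMAS AND PROOFS =====

-- rank lookup agrees with the two membership tests
lemma pvRank_getD (s : List Char) :
    pvRank.getD s 0 = (if s ∈ pvHighTasks then 2 else if s ∈ pvMediumTasks then (1 : Int) else 0) := by
  by_cases h1 : s = "expert_review".toList; · subst h1; decide
  by_cases h2 : s = "technical_draft".toList; · subst h2; decide
  by_cases h3 : s = "research".toList; · subst h3; decide
  by_cases h4 : s = "outline".toList; · subst h4; decide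
  by_cases h5 : s = "draft".toList; · subst h5; decide
  by_cases h6 : s = "edit".toList; · subst h6; decide
  by_cases h7 : s = "review".toList; · subst h7; decide
  have hfind : List.find? (fun p => p.1 == s) pvRank.items = none := by
    rw [List.find?_eq_none]
    intro p hp
    have hitems : pvRank.items =
        [("expert_review".toList, 2), ("technical_draft".toList, 2), ("research".toList, 2),
         ("outline".toList, 1), ("draft".toList, 1), ("edit".toList, 1), ("review".toList, 1)] := by
      decide
    rw [hitems] at hp
    simp only [List.mem_cons, List.not_mem_nil, or_false] at hp
    rcases hp with h | h | h | h | h | h | h <;>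
      (subst h; simp only [ne_eq]; intro hc; simp_all)
  rw [if_neg (by simp [pvHighTasks]; exact ⟨h1, h2, h3⟩),
      if_neg (by simp [pvMediumTasks]; exact ⟨h4, h5, h6, h7⟩)]
  simp [PySem.Dict.getD, PySem.Dict.get?, hfind]

-- A's first scan loop returns "high" iff some subtask is a high-complexity task
lemma pvLoopHigh_eq (l : List (List Char)) :
    pvLoopHigh l = (if l.any (fun s => decide (s ∈ pvHighTasks)) then some "high" else none) := by
  induction l with
  | nil => rfl
  | cons s rest ih => by_cases h : s ∈ pvHighTasks <;> simp [pvLoopHigh, h, ih]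

lemma pvLoopMedium_eq (l : List (List Char)) :
    pvLoopMedium l = (if l.any (fun s => decide (s ∈ pvMediumTasks)) then some "medium" else none) := by
  induction l with
  | nil => rfl
  | cons s rest ih => by_cases h : s ∈ pvMediumTasks <;> simp [pvLoopMedium, h, ih]

-- B's single pass computes the max rank = 2 / 1 / 0 by existence of a high / medium subtask
lemma pvFold_eq (l : List (List Char)) (acc : Int) (hacc : 0 ≤ acc) :
    l.foldl (fun acc part => max acc (pvRank.getD part 0)) acc
      = max acc (if l.any (fun s => decide (s ∈ pvHighTasks)) then 2
                 else if l.any (fun s => decide (s ∈ pvMediumTasks)) then 1 else 0) := by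
  induction l generalizing acc with
  | nil => simp [max_eq_left hacc]
  | cons s rest ih =>
    simp only [List.foldl_cons, List.any_cons]
    rw [ih _ (le_max_of_le_left hacc), pvRank_getD]
    by_cases h1 : s ∈ pvHighTasks <;> by_cases h2 : s ∈ pvMediumTasks <;>
    · simp only [h1, h2, decide_true, decide_false, Bool.true_or, Bool.false_or, if_true, if_false]
      split_ifs <;> omega

-- no occurrence of the separator ⇒ splitOn returns the whole string as a singleton
lemma pvSplitOn_go_no_match (sep : List Char) (fuel : Nat) (l cur : List Char)
    (acc : List (List Char)) (h : ∀ j, ¬ sep <+: l.drop j) :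
    PySem.Chars.splitOn.go sep fuel l cur acc = ((cur.reverse ++ l) :: acc).reverse := by
  induction fuel generalizing l cur acc with
  | zero => rfl
  | succ fuel ih =>
    cases l with
    | nil => simp [PySem.Chars.splitOn.go]
    | cons c rest =>
      have hpre : sep.isPrefixOf (c :: rest) = false := by
        by_contra hc
        exact h 0 (by simpa using List.isPrefixOf_iff_prefix.mp (by simpa using hc))
      rw [PySem.Chars.splitOn.go]
      rw [if_neg (by simp [hpre])]
      rw [ih rest (c :: cur) acc (fun j => by simpa using h (j + 1))]
      simp

lemma pvSplitOn_singleton (s sep : List Char) (h : PySem.Chars.isIn sep s = false) :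
    PySem.Chars.splitOn s sep = [s] := by
  rw [PySem.Chars.splitOn, pvSplitOn_go_no_match]
  · simp
  · intro j hj
    have : ∃ j, sep <+: s.drop j := ⟨j, hj⟩
    rw [PySem.Chars.exists_prefix_drop_iff_isIn] at this
    simp [h] at this

-- B's final table lookup at the three possible levels
lemma pvTable (l : List (List Char)) :
    PySem.List.pyGetD ["low", "medium", "high"]
        (if l.any (fun s => decide (s ∈ pvHighTasks)) then 2
         else if l.any (fun s => decide (s ∈ pvMediumTasks)) then 1 else 0) ""
      = (if l.any (fun s => decide (s ∈ pvHighTasks)) then "high"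
         else if l.any (fun s => decide (s ∈ pvMediumTasks)) then "medium" else "low") := by
  split_ifs <;> rfl

-- ===== VERDICT (by name: the statement is the Claim_ definition above) =====
theorem determine_task_complexity_py_spec : Claim_equal_determine_task_complexity_py := by
  intro task_name _
  unfold Spec_determine_task_complexity_py determine_task_complexity_py determine_task_complexity_py_alt
  rw [pvFold_eq _ 0 le_rfl]
  rw [show (max 0 (if (PySem.Chars.splitOn task_name.toList "_and_".toList).any (fun s => decide (s ∈ pvHighTasks)) then 2
      else if (PySem.Chars.splitOn task_name.toList "_and_".toList).any (fun s => decide (s ∈ pvMediumTasks)) then 1 else (0:Int)))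
      = (if (PySem.Chars.splitOn task_name.toList "_and_".toList).any (fun s => decide (s ∈ pvHighTasks)) then 2
      else if (PySem.Chars.splitOn task_name.toList "_and_".toList).any (fun s => decide (s ∈ pvMediumTasks)) then 1 else (0:Int))
      from by split_ifs <;> omega]
  rw [pvTable]
  by_cases hin : PySem.Chars.isIn "_and_".toList task_name.toList
  · simp only [hin, if_true]
    rw [pvLoopHigh_eq, pvLoopMedium_eq]
    split_ifs <;> simp_all
  · simp only [Bool.not_eq_true] at hin
    rw [pvSplitOn_singleton _ _ hin]
    simp only [hin, Bool.false_eq_true, if_false, List.any_cons, List.any_nil, Bool.or_false]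
    by_cases h1 : task_name.toList ∈ pvHighTasks <;>
    by_cases h2 : task_name.toList ∈ pvMediumTasks <;> simp [h1, h2]
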